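-- pv_equiv track=rewrite | github.com/OpenChapters/OCchaptertemplate | tools/occonvert/occonvert/utils.py | derive_chabbr
-- ===== SOURCE A (Python) =====
-- def derive_chabbr(title: str) -> str:
--     """Derive a 6-character chapter abbreviation from a title.
--
--     Takes the uppercase consonants from significant words,
--     padded or truncated to exactly 6 characters.
--     """
--     # Remove common short words
--     stopwords = {"the", "a", "an", "of", "in", "on", "to", "for", "and", "or", "with"}
--     words = [w for w in title.split() if w.lower() not in stopwords]
--     if not words:
--         words = title.split()
--
--     # Collect uppercase consonants from each word
--     consonants = ""
--     for w in words:
--         for ch in w.upper():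
--             if ch.isalpha() and ch not in "AEIOU":
--                 consonants += ch
--             if len(consonants) >= 6:
--                 break
--         if len(consonants) >= 6:
--             break
--
--     # If we don't have 6 characters yet, add vowels
--     if len(consonants) < 6:
--         for w in words:
--             for ch in w.upper():
--                 if ch.isalpha() and ch not in consonants:
--                     consonants += ch
--                 if len(consonants) >= 6:
--                     break
--             if len(consonants) >= 6:
--                 break
--
--     # Pad with X if still short
--     consonants = consonants.ljust(6, "X")
--     return consonants[:6]
-- ===== SOURCE B (Python) =====
-- def derive_chabbr(title: str) -> str:
--     """Derive a 6-character chapter abbreviation from a title (single pass)."""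
--     stopwords = {"the", "a", "an", "of", "in", "on", "to", "for", "and", "or", "with"}
--     words = [w for w in title.split() if w.lower() not in stopwords] or title.split()
--
--     cons = []
--     vowels = []
--     for w in words:
--         for ch in w.upper():
--             if ch.isalpha():
--                 if ch in "AEIOU":
--                     if ch not in vowels:
--                         vowels.append(ch)
--                 else:
--                     cons.append(ch)
--
--     result = "".join(cons[:6])
--     for v in vowels:
--         if len(result) >= 6:
--             break
--         result += v
--     return (result + "XXXXXX")[:6]
-- ===== Notes on version B (the rewrite author's own statement) =====
-- stated objective: simpler
-- what changed: A's two breaking passes over the words (consonants with a mid-stream break at 6, then a restart pass re-scanning all words and testing membership in the growing result) are replaced by one classifying pass that collects all consonants and the deduped vowels, after which the abbreviation is assembled by truncation, vowel top-up and X-padding.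
import Mathlib
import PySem

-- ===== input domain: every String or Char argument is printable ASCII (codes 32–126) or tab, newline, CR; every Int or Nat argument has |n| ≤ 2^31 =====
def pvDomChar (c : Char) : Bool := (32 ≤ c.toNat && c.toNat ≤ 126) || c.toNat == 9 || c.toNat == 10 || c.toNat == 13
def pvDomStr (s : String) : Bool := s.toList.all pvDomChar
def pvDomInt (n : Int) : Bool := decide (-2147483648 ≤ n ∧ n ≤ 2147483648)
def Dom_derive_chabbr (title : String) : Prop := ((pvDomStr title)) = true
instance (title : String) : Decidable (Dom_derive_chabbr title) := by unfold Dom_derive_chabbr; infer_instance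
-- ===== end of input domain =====

-- B replaces A's two break-at-6 passes over the words by ONE classifying pass
-- (all consonants + deduped vowels), then assembles the abbreviation; objective: simpler.

-- ===== PORT A =====
def pvA_stopwords : List String :=
  ["the", "a", "an", "of", "in", "on", "to", "for", "and", "or", "with"]

def pvA_words (title : String) : List String :=
  let words := (PySem.Str.split₀ title).filter
    (fun w => !(pvA_stopwords.contains (PySem.Str.lower w)))
  if words = [] then PySem.Str.split₀ title else words

-- first pass, inner loop: append consonants, break once length ≥ 6
def pvA_inner1 : List Char → List Char → List Char
  | [], s => s
  | ch :: rest, s =>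
    let s' := if PySem.Chars.isalpha ch && !(['A','E','I','O','U'].contains ch)
              then s ++ [ch] else s
    if 6 ≤ s'.length then s' else pvA_inner1 rest s'

def pvA_outer1 : List String → List Char → List Char
  | [], s => s
  | w :: ws, s =>
    let s' := pvA_inner1 (PySem.Chars.upper w.toList) s
    if 6 ≤ s'.length then s' else pvA_outer1 ws s'

-- second pass, inner loop: append alpha chars not already present, break at 6
def pvA_inner2 : List Char → List Char → List Char
  | [], s => s
  | ch :: rest, s =>
    let s' := if PySem.Chars.isalpha ch && !(s.contains ch) then s ++ [ch] else s
    if 6 ≤ s'.length then s' else pvA_inner2 rest s'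

def pvA_outer2 : List String → List Char → List Char
  | [], s => s
  | w :: ws, s =>
    let s' := pvA_inner2 (PySem.Chars.upper w.toList) s
    if 6 ≤ s'.length then s' else pvA_outer2 ws s'

def derive_chabbr (title : String) : String :=
  let words := pvA_words title
  let consonants := pvA_outer1 words []
  let consonants := if consonants.length < 6 then pvA_outer2 words consonants else consonants
  -- consonants.ljust(6, "X"): pad on the right with 'X' to length 6 (exact)
  let padded := consonants ++ List.replicate (6 - consonants.length) 'X'
  String.ofList (padded.take 6)

-- ===== PORT B =====
def pvB_words (title : String) : List String :=
  let words := (PySem.Str.split₀ title).filter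
    (fun w => !(["the", "a", "an", "of", "in", "on", "to", "for", "and", "or", "with"].contains (PySem.Str.lower w)))
  if words = [] then PySem.Str.split₀ title else words

-- single classifying pass over one word's uppercase chars
def pvB_scanWord : List Char → List Char → List Char → List Char × List Char
  | [], cons, vows => (cons, vows)
  | ch :: rest, cons, vows =>
    if PySem.Chars.isalpha ch then
      if ['A','E','I','O','U'].contains ch then
        pvB_scanWord rest cons (if vows.contains ch then vows else vows ++ [ch])
      else
        pvB_scanWord rest (cons ++ [ch]) vows
    else
      pvB_scanWord rest cons vows

def pvB_scan : List String → List Char → List Char → List Char × List Char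
  | [], cons, vows => (cons, vows)
  | w :: ws, cons, vows =>
    let p := pvB_scanWord (PySem.Chars.upper w.toList) cons vows
    pvB_scan ws p.1 p.2

-- append vowels while the result is shorter than 6
def pvB_addVowels : List Char → List Char → List Char
  | [], r => r
  | v :: vs, r => if 6 ≤ r.length then r else pvB_addVowels vs (r ++ [v])

def derive_chabbr_alt (title : String) : String :=
  let words := pvB_words title
  let p := pvB_scan words [] []
  let result := pvB_addVowels p.2 (p.1.take 6)
  String.ofList ((result ++ ['X','X','X','X','X','X']).take 6)

-- ===== PRECONDITION & SPEC =====
def Spec_derive_chabbr (title : String) (out : String) : Prop := out = derive_chabbr_alt title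
instance (title : String) (out : String) : Decidable (Spec_derive_chabbr title out) := by unfold Spec_derive_chabbr; infer_instance

-- ===== CLAIM (what is proved, stated in full; the proofs are below) =====
def Claim_equal_derive_chabbr : Prop := ∀ (title : String), Dom_derive_chabbr title → Spec_derive_chabbr title (derive_chabbr title)

-- ===== LEMMAS AND PROOFS =====

-- character classes
def pvIsCons (ch : Char) : Bool :=
  PySem.Chars.isalpha ch && !(['A','E','I','O','U'].contains ch)
def pvIsVow (ch : Char) : Bool :=
  PySem.Chars.isalpha ch && ['A','E','I','O','U'].contains ch

def pvConsOf (w : String) : List Char := (PySem.Chars.upper w.toList).filter pvIsCons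
def pvVowOf (w : String) : List Char := (PySem.Chars.upper w.toList).filter pvIsVow

-- online dedup fold (B's vowel accumulator)
def pvDedup (vs : List Char) (l : List Char) : List Char :=
  l.foldl (fun v ch => if v.contains ch then v else v ++ [ch]) vs

-- the vowels A's second pass appends, relative to already-seen vowels vs
def pvNewVow : List Char → List Char → List Char
  | _, [] => []
  | vs, ch :: rest =>
    if pvIsVow ch && !(vs.contains ch) then ch :: pvNewVow (vs ++ [ch]) rest
    else pvNewVow vs rest

def pvNewVowStream : List Char → List String → List Char
  | _, [] => []
  | vs, w :: ws =>
    let n := pvNewVow vs (PySem.Chars.upper w.toList)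
    n ++ pvNewVowStream (vs ++ n) ws

theorem pvA_words_eq (title : String) : pvA_words title = pvB_words title := by
  simp [pvA_words, pvB_words, pvA_stopwords]

theorem pvA_inner1_eq (chars : List Char) : ∀ s : List Char, s.length < 6 →
    pvA_inner1 chars s = (s ++ chars.filter pvIsCons).take 6 := by
  induction chars with
  | nil =>
    intro s h
    simp only [pvA_inner1, List.filter_nil, List.append_nil]
    exact (List.take_of_length_le h.le).symm
  | cons ch rest ih =>
    intro s h
    simp only [pvA_inner1]
    by_cases hc : (PySem.Chars.isalpha ch && !(['A','E','I','O','U'].contains ch)) = true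
    · rw [if_pos hc]
      rw [List.filter_cons_of_pos (by simpa [pvIsCons] using hc)]
      by_cases h6 : 6 ≤ (s ++ [ch]).length
      · rw [if_pos h6,
           show s ++ ch :: rest.filter pvIsCons = (s ++ [ch]) ++ rest.filter pvIsCons by simp,
           List.take_left' (by simp at h6 ⊢; omega)]
      · rw [if_neg h6, ih _ (by simp at h6 ⊢; omega)]
        simp
    · rw [if_neg hc, if_neg (show ¬ 6 ≤ s.length by omega), ih _ h,
         List.filter_cons_of_neg (by simpa [pvIsCons] using hc)]

theorem pvA_outer1_eq (words : List String) : ∀ s : List Char, s.length < 6 →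
    pvA_outer1 words s = (s ++ words.flatMap pvConsOf).take 6 := by
  induction words with
  | nil =>
    intro s h
    simp only [pvA_outer1, List.flatMap_nil, List.append_nil]
    exact (List.take_of_length_le h.le).symm
  | cons w ws ih =>
    intro s h
    simp only [pvA_outer1]
    rw [pvA_inner1_eq _ s h,
       show (PySem.Chars.upper w.toList).filter pvIsCons = pvConsOf w from rfl,
       List.flatMap_cons]
    by_cases h6 : 6 ≤ (s ++ pvConsOf w).length
    · rw [if_pos (show 6 ≤ ((s ++ pvConsOf w).take 6).length by
            have h6' := h6; simp at h6' ⊢; omega),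
         ← List.append_assoc, List.take_append_of_le_length h6]
    · have hlt : (s ++ pvConsOf w).length < 6 := by omega
      rw [List.take_of_length_le hlt.le, if_neg (show ¬ 6 ≤ (s ++ pvConsOf w).length by omega),
         ih _ hlt]
      simp

theorem pvB_scanWord_eq (chars : List Char) : ∀ cons vows : List Char,
    pvB_scanWord chars cons vows
      = (cons ++ chars.filter pvIsCons, pvDedup vows (chars.filter pvIsVow)) := by
  induction chars with
  | nil => intro cons vows; simp [pvB_scanWord, pvDedup]
  | cons ch rest ih =>
    intro cons vows
    simp only [pvB_scanWord]
    by_cases ha : PySem.Chars.isalpha ch = true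
    · rw [if_pos ha]
      by_cases hv : (['A','E','I','O','U'].contains ch) = true
      · rw [if_pos hv, ih,
           List.filter_cons_of_neg (show ¬ pvIsCons ch = true by
             simp only [pvIsCons]; rw [ha, hv]; decide),
           List.filter_cons_of_pos (show pvIsVow ch = true by
             simp only [pvIsVow]; rw [ha, hv]; decide)]
        simp [pvDedup]
      · have hv' : (['A','E','I','O','U'].contains ch) = false := by
          cases hx : (['A','E','I','O','U'].contains ch) with
          | false => rfl
          | true => exact absurd hx hv
        rw [if_neg hv, ih,
           List.filter_cons_of_pos (show pvIsCons ch = true by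
             simp only [pvIsCons]; rw [ha, hv']; decide),
           List.filter_cons_of_neg (show ¬ pvIsVow ch = true by
             simp only [pvIsVow]; rw [ha, hv']; decide)]
        simp
    · rw [if_neg ha, ih,
         List.filter_cons_of_neg (show ¬ pvIsCons ch = true by simp [pvIsCons, ha]),
         List.filter_cons_of_neg (show ¬ pvIsVow ch = true by simp [pvIsVow, ha])]

theorem pvB_scan_eq (words : List String) : ∀ cons vows : List Char,
    pvB_scan words cons vows
      = (cons ++ words.flatMap pvConsOf, pvDedup vows (words.flatMap pvVowOf)) := by
  induction words with
  | nil => intro c v; simp [pvB_scan, pvDedup]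
  | cons w ws ih =>
    intro c v
    simp only [pvB_scan]
    rw [pvB_scanWord_eq]
    simp only [List.flatMap_cons]
    rw [ih]
    simp [pvConsOf, pvVowOf, pvDedup, List.foldl_append, List.append_assoc]

theorem pvB_addVowels_eq (l : List Char) : ∀ r : List Char, r.length ≤ 6 →
    pvB_addVowels l r = (r ++ l).take 6 := by
  induction l with
  | nil =>
    intro r h
    simp only [pvB_addVowels, List.append_nil]
    exact (List.take_of_length_le h).symm
  | cons v vs ih =>
    intro r h
    simp only [pvB_addVowels]
    by_cases h6 : 6 ≤ r.length
    · rw [if_pos h6, List.take_left' (by omega)]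
    · rw [if_neg h6, ih _ (by simp; omega)]
      simp

theorem pvNewVow_filter (chars : List Char) : ∀ vs,
    pvNewVow vs chars = pvNewVow vs (chars.filter pvIsVow) := by
  induction chars with
  | nil => intro vs; simp
  | cons c rest ih =>
    intro vs
    by_cases hv : pvIsVow c = true
    · rw [List.filter_cons_of_pos hv]
      simp only [pvNewVow]
      by_cases hc : (pvIsVow c && !(vs.contains c)) = true
      · rw [if_pos hc, if_pos hc, ← ih]
      · rw [if_neg hc, if_neg hc, ← ih]
    · rw [List.filter_cons_of_neg (by simp [hv])]
      simp only [pvNewVow]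
      rw [if_neg (by simp [hv]), ← ih]

theorem pvDedup_eq_newVow (l : List Char) : ∀ vs, (∀ ch ∈ l, pvIsVow ch = true) →
    pvDedup vs l = vs ++ pvNewVow vs l := by
  induction l with
  | nil => intro vs _; simp [pvDedup, pvNewVow]
  | cons a l ih =>
    intro vs h
    have hva : pvIsVow a = true := h a (by simp)
    rw [show pvDedup vs (a :: l) = pvDedup (if vs.contains a then vs else vs ++ [a]) l from rfl]
    simp only [pvNewVow]
    by_cases hc : vs.contains a = true
    · have hmem : a ∈ vs := by simpa using hc
      rw [if_pos hc, if_neg (by simp [hmem]), ih _ (fun ch hch => h ch (List.mem_cons_of_mem _ hch))]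
    · have hnm : a ∉ vs := by simpa using hc
      rw [if_neg hc, if_pos (by simp [hva, hnm]), ih _ (fun ch hch => h ch (List.mem_cons_of_mem _ hch))]
      simp

theorem pvNewVowStream_eq (words : List String) : ∀ vs,
    vs ++ pvNewVowStream vs words = pvDedup vs (words.flatMap pvVowOf) := by
  induction words with
  | nil => intro vs; simp [pvNewVowStream, pvDedup]
  | cons w ws ih =>
    intro vs
    simp only [pvNewVowStream, List.flatMap_cons]
    have hsplit : pvDedup vs (pvVowOf w ++ ws.flatMap pvVowOf)
        = pvDedup (pvDedup vs (pvVowOf w)) (ws.flatMap pvVowOf) := by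
      simp [pvDedup, List.foldl_append]
    have hw : pvDedup vs (pvVowOf w) = vs ++ pvNewVow vs (PySem.Chars.upper w.toList) := by
      rw [show pvVowOf w = (PySem.Chars.upper w.toList).filter pvIsVow from rfl,
         pvDedup_eq_newVow _ _ (fun ch hch => (List.mem_filter.mp hch).2), ← pvNewVow_filter]
    rw [hsplit, hw, ← ih (vs ++ pvNewVow vs (PySem.Chars.upper w.toList))]
    simp

theorem pvA_inner2_eq (chars : List Char) : ∀ (C vs : List Char),
    (∀ ch ∈ C, pvIsCons ch = true) →
    (∀ ch ∈ chars, pvIsCons ch = true → ch ∈ C) →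
    (C ++ vs).length < 6 →
    pvA_inner2 chars (C ++ vs) = (C ++ (vs ++ pvNewVow vs chars)).take 6 := by
  induction chars with
  | nil =>
    intro C vs _ _ hlen
    simp only [pvA_inner2, pvNewVow, List.append_nil]
    exact (List.take_of_length_le hlen.le).symm
  | cons ch rest ih =>
    intro C vs hC hch hlen
    simp only [pvA_inner2]
    by_cases hcond : (PySem.Chars.isalpha ch && !((C ++ vs).contains ch)) = true
    · have h2 := hcond
      rw [Bool.and_eq_true] at h2
      have ha : PySem.Chars.isalpha ch = true := h2.1
      have hnin : ch ∉ C ++ vs := by simpa using h2.2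
      have hninC : ch ∉ C := fun hm => hnin (List.mem_append_left _ hm)
      have hninvs : ch ∉ vs := fun hm => hnin (List.mem_append_right _ hm)
      have hvw : pvIsVow ch = true := by
        by_cases hAE : (['A','E','I','O','U'].contains ch) = true
        · simp only [pvIsVow]; rw [ha, hAE]; decide
        · have hAE' : (['A','E','I','O','U'].contains ch) = false := by
            cases hx : (['A','E','I','O','U'].contains ch) with
            | false => rfl
            | true => exact absurd hx hAE
          exact absurd (hch ch (by simp) (by simp only [pvIsCons]; rw [ha, hAE']; decide)) hninC
      rw [if_pos hcond,
         show (C ++ vs) ++ [ch] = C ++ (vs ++ [ch]) by simp,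
         show pvNewVow vs (ch :: rest) = ch :: pvNewVow (vs ++ [ch]) rest by
           simp only [pvNewVow]; rw [if_pos (by simp [hvw, hninvs])]]
      by_cases h6 : 6 ≤ (C ++ (vs ++ [ch])).length
      · rw [if_pos h6,
           show C ++ (vs ++ ch :: pvNewVow (vs ++ [ch]) rest)
              = (C ++ (vs ++ [ch])) ++ pvNewVow (vs ++ [ch]) rest by simp,
           List.take_left' (by simp at hlen h6 ⊢; omega)]
      · rw [if_neg h6,
           ih C (vs ++ [ch]) hC (fun c hc hcons => hch c (List.mem_cons_of_mem _ hc) hcons)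
             (by simp at h6 ⊢; omega)]
        simp
    · have hnv : pvNewVow vs (ch :: rest) = pvNewVow vs rest := by
        simp only [pvNewVow]
        apply if_neg
        by_cases ha : PySem.Chars.isalpha ch = true
        · have hin : ch ∈ C ++ vs := by
            by_contra hnm
            exact hcond (by simp [ha, hnm])
          rcases List.mem_append.mp hin with hc | hv
          · have h' := hC ch hc
            simp only [pvIsCons, ha, Bool.true_and] at h'
            have hmemF : (['A','E','I','O','U'].contains ch) = false := by
              cases hx : (['A','E','I','O','U'].contains ch) with
              | false => rfl
              | true => rw [hx] at h'; exact absurd h' (by decide)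
            simp only [pvIsVow]; rw [hmemF]; simp
          · simp [hv]
        · simp [pvIsVow, ha]
      rw [if_neg hcond, if_neg (show ¬ 6 ≤ (C ++ vs).length by omega), hnv,
         ih C vs hC (fun c hc h' => hch c (List.mem_cons_of_mem _ hc) h') hlen]

theorem pvA_outer2_eq (words : List String) : ∀ (C vs : List Char),
    (∀ ch ∈ C, pvIsCons ch = true) →
    (∀ w ∈ words, ∀ ch ∈ PySem.Chars.upper w.toList, pvIsCons ch = true → ch ∈ C) →
    (C ++ vs).length < 6 →
    pvA_outer2 words (C ++ vs) = (C ++ (vs ++ pvNewVowStream vs words)).take 6 := by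
  induction words with
  | nil =>
    intro C vs _ _ hlen
    simp only [pvA_outer2, pvNewVowStream, List.append_nil]
    exact (List.take_of_length_le hlen.le).symm
  | cons w ws ih =>
    intro C vs hC hws hlen
    simp only [pvA_outer2, pvNewVowStream]
    rw [pvA_inner2_eq _ C vs hC (hws w (by simp)) hlen]
    by_cases h6 : 6 ≤ (C ++ (vs ++ pvNewVow vs (PySem.Chars.upper w.toList))).length
    · rw [if_pos (show 6 ≤ ((C ++ (vs ++ pvNewVow vs (PySem.Chars.upper w.toList))).take 6).length by
            have h6' := h6; simp at h6' ⊢; omega),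
         show C ++ (vs ++ (pvNewVow vs (PySem.Chars.upper w.toList)
                ++ pvNewVowStream (vs ++ pvNewVow vs (PySem.Chars.upper w.toList)) ws))
            = (C ++ (vs ++ pvNewVow vs (PySem.Chars.upper w.toList)))
                ++ pvNewVowStream (vs ++ pvNewVow vs (PySem.Chars.upper w.toList)) ws by simp,
         List.take_append_of_le_length h6]
    · have hlt : (C ++ (vs ++ pvNewVow vs (PySem.Chars.upper w.toList))).length < 6 := by omega
      rw [List.take_of_length_le hlt.le,
         if_neg (show ¬ 6 ≤ (C ++ (vs ++ pvNewVow vs (PySem.Chars.upper w.toList))).length by omega),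
         ih C (vs ++ pvNewVow vs (PySem.Chars.upper w.toList)) hC
           (fun w' hw' => hws w' (List.mem_cons_of_mem _ hw')) hlt]
      simp

theorem pvPad (l : List Char) (h : l.length ≤ 6) :
    (l ++ List.replicate (6 - l.length) 'X').take 6 = (l ++ ['X','X','X','X','X','X']).take 6 := by
  rw [List.take_append, List.take_append, List.take_of_length_le h,
     show ('X'::'X'::'X'::'X'::'X'::'X'::([] : List Char)) = List.replicate 6 'X' from rfl,
     List.take_replicate, List.take_replicate]
  congr 2
  omega

-- ===== VERDICT (by name: the statement is the Claim_ definition above) =====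
theorem derive_chabbr_spec : Claim_equal_derive_chabbr := by
  unfold Claim_equal_derive_chabbr Spec_derive_chabbr
  intro title _
  simp only [derive_chabbr, derive_chabbr_alt]
  rw [← pvA_words_eq]
  set ws := pvA_words title with hws
  have hout1 : pvA_outer1 ws [] = (ws.flatMap pvConsOf).take 6 := by
    simpa using pvA_outer1_eq ws [] (by simp)
  have hscan : pvB_scan ws [] [] = (ws.flatMap pvConsOf, pvDedup [] (ws.flatMap pvVowOf)) := by
    simpa using pvB_scan_eq ws [] []
  have hfst : (pvB_scan ws [] []).1 = ws.flatMap pvConsOf := by rw [hscan]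
  have hsnd : (pvB_scan ws [] []).2 = pvDedup [] (ws.flatMap pvVowOf) := by rw [hscan]
  rw [hout1, hfst, hsnd]
  set C := ws.flatMap pvConsOf with hCdef
  set V := pvDedup [] (ws.flatMap pvVowOf) with hVdef
  by_cases hlen : C.length < 6
  · have hCtake : C.take 6 = C := List.take_of_length_le (by omega)
    have hCcons : ∀ ch ∈ C, pvIsCons ch = true := by
      intro ch hch
      rw [hCdef] at hch
      rcases List.mem_flatMap.mp hch with ⟨w, _, hmem⟩
      exact (List.mem_filter.mp hmem).2
    have hwords : ∀ w ∈ ws, ∀ ch ∈ PySem.Chars.upper w.toList, pvIsCons ch = true → ch ∈ C := by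
      intro w hw ch hch hcons
      rw [hCdef]
      exact List.mem_flatMap.mpr ⟨w, hw, List.mem_filter.mpr ⟨hch, hcons⟩⟩
    have hout2 : pvA_outer2 ws C = (C ++ V).take 6 := by
      calc pvA_outer2 ws C = pvA_outer2 ws (C ++ []) := by simp
        _ = (C ++ ([] ++ pvNewVowStream [] ws)).take 6 :=
            pvA_outer2_eq ws C [] hCcons hwords (by simpa using hlen)
        _ = (C ++ V).take 6 := by rw [pvNewVowStream_eq ws [], ← hVdef]
    have hB : pvB_addVowels V C = (C ++ V).take 6 :=
      pvB_addVowels_eq V C (by omega)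
    rw [hCtake, if_pos hlen, hout2, hB]
    exact congrArg String.ofList (pvPad _ (by simp))
  · have h6 : (C.take 6).length = 6 := by simp; omega
    have hB : pvB_addVowels V (C.take 6) = C.take 6 := by
      rw [pvB_addVowels_eq V (C.take 6) h6.le,
         List.take_append_of_le_length h6.ge, List.take_of_length_le h6.le]
    rw [if_neg (show ¬ (C.take 6).length < 6 by omega), hB]
    exact congrArg String.ofList (pvPad _ h6.le)
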